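-- pv_equiv track=rewrite | github.com/charlysl/MIT-6.009-Python-Self-Learning | labs/lab2_solution.py | get_actors_with_bacon_number
-- ===== SOURCE A (Python) =====
-- BACON = 4724
--
-- def make_neighbor_db(data):
--     """
--     Returns a different mapping that is more conducive to the kinds of
--     operations we want to perform.  This new mapping maps each actor id to a
--     set of people they have acted with (these sets also contain IDs, not
--     names).
--     """
--     acted_with = {}
--     for i, j, _ in data:
--         # the setdefault method lets us avoid checking for ourselves whether an
--         # actor is aclready in the dictionary.
--         # see https://docs.python.org/3/library/stdtypes.html#dict.setdefault
--         acted_with.setdefault(i, set()).add(j)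
--         acted_with.setdefault(j, set()).add(i)
--     return acted_with
--
-- def expand(acted_with, current_level, parents):
--     """
--     Run one "expansion", moving to a larger Bacon number.
--
--     Arguments:
--        acted_with: a mapping from IDs to the people they have acted with (the
--                    output from make_neighbor_db)
--        current_level: a set containing the IDs at the 'current' Bacon level (N)
--        parents: a dictionary mapping actor IDs to their parents (i.e., the actor
--                 that led to them while traversing the graph).
--
--     Returns:
--        The set of people with Bacon number N+1
--     """
--     new_level = set()
--     # we want to find all the neighbors of everyone at level N who have not
--     # already been seen as we work outward from the center.
--     for actor in current_level:
--         for neighbor in acted_with[actor]: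
--             # avoid duplicates by ignoring people we have already seen.  every
--             # actor we've seen is in the parents dictionary, so we skip any
--             # actor that is already in that dictionary.
--             if neighbor not in parents:
--                 # this is a new actor.  add them to our set of people at level
--                 # N+1, and also add them to the parents dictionary so we don't
--                 # double-count them later.
--                 parents[neighbor] = actor
--                 new_level.add(neighbor)
--     return new_level
--
-- def get_actors_with_bacon_number(data, n):
--     """
--     Returns the set of people who have a given Bacon number.
--     """
--     acted_with = make_neighbor_db(data)
--     # Initialize the parents and the first level of the Bacon number (level 0).
--     # BACON has no parent, and he is the only member of level 0.
--     parents = {BACON: None}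
--     cur_level = {BACON}
--     # Now, expand out N times, so that we end up with the people with Bacon
--     # number N in cur_level.
--     for i in range(n):
--         cur_level = expand(acted_with, cur_level, parents)
--         if not cur_level:
--             return set()
--     return cur_level  # spec requires that we return a set.
-- ===== SOURCE B (Python) =====
-- BACON = 4724
--
-- def get_actors_with_bacon_number(data, n):
--     """
--     Single queue-driven BFS from BACON computing every actor's distance once,
--     then filter the distance map for distance == n (instead of A's
--     level-by-level frontier expansion repeated n times).
--     """
--     if n <= 0:
--         # Bacon number 0 (and A's behaviour for non-positive n): Bacon himself.
--         return {BACON}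
--     acted_with = {}
--     for i, j, _ in data:
--         acted_with.setdefault(i, set()).add(j)
--         acted_with.setdefault(j, set()).add(i)
--     dist = {BACON: 0}
--     queue = [BACON]
--     head = 0
--     while head < len(queue):
--         actor = queue[head]
--         head += 1
--         for nb in acted_with.get(actor, ()):
--             if nb not in dist:
--                 dist[nb] = dist[actor] + 1
--                 queue.append(nb)
--     return {a for a, d in dist.items() if d == n}
-- ===== Notes on version B (the rewrite author's own statement) =====
-- stated objective: alternative
-- what changed: A repeats a frontier-expansion step n times, threading a parents dict and rebuilding a new frontier set per level; B runs one queue-driven BFS that labels every reachable actor with its distance in a single dict and then filters the distance map for distance == n.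
import Mathlib
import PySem

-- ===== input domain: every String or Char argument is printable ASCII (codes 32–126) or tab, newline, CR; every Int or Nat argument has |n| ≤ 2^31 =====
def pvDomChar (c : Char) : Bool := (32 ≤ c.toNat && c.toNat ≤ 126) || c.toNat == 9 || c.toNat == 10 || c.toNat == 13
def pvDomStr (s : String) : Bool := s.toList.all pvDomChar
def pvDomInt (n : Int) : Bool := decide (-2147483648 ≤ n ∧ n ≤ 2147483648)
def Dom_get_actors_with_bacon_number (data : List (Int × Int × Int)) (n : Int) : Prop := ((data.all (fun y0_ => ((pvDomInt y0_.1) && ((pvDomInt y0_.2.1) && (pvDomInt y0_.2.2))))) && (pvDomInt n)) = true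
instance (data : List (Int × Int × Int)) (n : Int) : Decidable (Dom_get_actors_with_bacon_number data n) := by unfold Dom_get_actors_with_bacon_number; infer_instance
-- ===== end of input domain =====

-- B replaces A's n-fold level-by-level frontier expansion by one queue-driven BFS
-- computing a distance map once, then filters for distance == n (objective: alternative).

-- ===== PORT A =====
def pvBACON : Int := 4724

-- make_neighbor_db: acted_with.setdefault(k, set()).add(x) is Dict.modify k ∅ (·.add x)
def pvMakeNeighborDb (data : List (Int × Int × Int)) : PySem.Dict Int (PySem.Set Int) :=
  data.foldl (fun acted_with t =>
    let d1 := PySem.Dict.modify acted_with t.1 PySem.Set.empty (fun s => PySem.Set.add s t.2.1)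
    PySem.Dict.modify d1 t.2.1 PySem.Set.empty (fun s => PySem.Set.add s t.1))
    PySem.Dict.empty

-- expand: returns (parents, new_level); python mutates parents and returns new_level.
-- acted_with[actor] is read with getD: under Pre_ every looked-up actor is a key.
def pvExpand (acted_with : PySem.Dict Int (PySem.Set Int)) (current_level : PySem.Set Int)
    (parents : PySem.Dict Int (Option Int)) : PySem.Dict Int (Option Int) × PySem.Set Int :=
  current_level.foldl (fun st actor =>
    (PySem.Dict.getD acted_with actor PySem.Set.empty).foldl (fun st2 neighbor =>
      if st2.1.contains neighbor then st2
      else (PySem.Dict.insert st2.1 neighbor (some actor), PySem.Set.add st2.2 neighbor)) st)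
    (parents, PySem.Set.empty)

-- the 'for i in range(n)' loop with its early 'return set()'
def pvLoopA (acted_with : PySem.Dict Int (PySem.Set Int)) :
    Nat → PySem.Dict Int (Option Int) → PySem.Set Int → PySem.Set Int
  | 0, _, cur_level => cur_level
  | m + 1, parents, cur_level =>
    let r := pvExpand acted_with cur_level parents
    if r.2 = PySem.Set.empty then PySem.Set.empty else pvLoopA acted_with m r.1 r.2

def get_actors_with_bacon_number (data : List (Int × Int × Int)) (n : Int) : List Int :=
  pvLoopA (pvMakeNeighborDb data) n.toNat
    (PySem.Dict.insert PySem.Dict.empty pvBACON none)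
    (PySem.Set.add PySem.Set.empty pvBACON)

-- ===== PORT B =====
def pvActedWith (data : List (Int × Int × Int)) : PySem.Dict Int (PySem.Set Int) :=
  data.foldl (fun acted_with t =>
    match t with
    | (i, j, _) =>
      let d1 := PySem.Dict.modify acted_with i PySem.Set.empty (fun s => PySem.Set.add s j)
      PySem.Dict.modify d1 j PySem.Set.empty (fun s => PySem.Set.add s i))
    PySem.Dict.empty

-- Source B's 'while head < len(queue)' scan of the growing queue list = recursion on the
-- unprocessed tail (fuel makes it structural; 2*len(data)+2 exceeds every possible
-- number of dequeues, so the fuel branch is never the one that returns).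
def pvBfs (acted_with : PySem.Dict Int (PySem.Set Int)) :
    Nat → List Int → PySem.Dict Int Int → PySem.Dict Int Int
  | 0, _, dist => dist
  | _ + 1, [], dist => dist
  | fuel + 1, actor :: rest, dist =>
    let st := (PySem.Dict.getD acted_with actor PySem.Set.empty).foldl
      (fun st2 nb =>
        if st2.1.contains nb then st2
        else (PySem.Dict.insert st2.1 nb (PySem.Dict.getD st2.1 actor 0 + 1), st2.2 ++ [nb]))
      (dist, rest)
    pvBfs acted_with fuel st.2 st.1

def get_actors_with_bacon_number_alt (data : List (Int × Int × Int)) (n : Int) : List Int :=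
  if n ≤ 0 then [pvBACON]
  else
    let dist := pvBfs (pvActedWith data) (2 * data.length + 2) [pvBACON]
      (PySem.Dict.insert PySem.Dict.empty pvBACON 0)
    (dist.items.filter (fun q => q.2 == n)).map Prod.fst

-- ===== PRECONDITION & SPEC =====
-- Pre_ excludes exactly the inputs where Python A raises KeyError: n ≥ 1 while no edge
-- of data touches BACON (then expand evaluates acted_with[BACON] on a missing key).
def Pre_get_actors_with_bacon_number (data : List (Int × Int × Int)) (n : Int) : Prop :=
  n ≤ 0 ∨ ∃ t ∈ data, t.1 = pvBACON ∨ t.2.1 = pvBACON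
instance (data : List (Int × Int × Int)) (n : Int) : Decidable (Pre_get_actors_with_bacon_number data n) := by unfold Pre_get_actors_with_bacon_number; infer_instance

def pvWitness_get_actors_with_bacon_number : (List (Int × Int × Int)) × Int := ([(4724, 1, 10)], 1)

def Spec_get_actors_with_bacon_number (data : List (Int × Int × Int)) (n : Int) (out : List Int) : Prop := out = get_actors_with_bacon_number_alt data n
instance (data : List (Int × Int × Int)) (n : Int) (out : List Int) : Decidable (Spec_get_actors_with_bacon_number data n out) := by unfold Spec_get_actors_with_bacon_number; infer_instance

-- ===== CLAIM (what is proved, stated in full; the proofs are below) =====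
def Claim_equal_get_actors_with_bacon_number : Prop := ∀ (data : List (Int × Int × Int)) (n : Int), Dom_get_actors_with_bacon_number data n → Pre_get_actors_with_bacon_number data n → Spec_get_actors_with_bacon_number data n (get_actors_with_bacon_number data n)

-- ===== LEMMAS AND PROOFS =====

-- named forms of the two inner loop bodies (proof-side abbreviations)
def pvStepA (actor : Int) (st2 : PySem.Dict Int (Option Int) × PySem.Set Int) (nb : Int) :
    PySem.Dict Int (Option Int) × PySem.Set Int :=
  if st2.1.contains nb then st2
  else (PySem.Dict.insert st2.1 nb (some actor), PySem.Set.add st2.2 nb)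

def pvStepB (actor : Int) (st2 : PySem.Dict Int Int × List Int) (nb : Int) :
    PySem.Dict Int Int × List Int :=
  if st2.1.contains nb then st2
  else (PySem.Dict.insert st2.1 nb (PySem.Dict.getD st2.1 actor 0 + 1), st2.2 ++ [nb])

lemma pvExpand_eq (adw : PySem.Dict Int (PySem.Set Int)) (cur : PySem.Set Int)
    (p : PySem.Dict Int (Option Int)) :
    pvExpand adw cur p
      = cur.foldl (fun st actor => (PySem.Dict.getD adw actor PySem.Set.empty).foldl (pvStepA actor) st)
          (p, PySem.Set.empty) := rfl

lemma pvBfs_zero (adw : PySem.Dict Int (PySem.Set Int)) (q : List Int) (d : PySem.Dict Int Int) :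
    pvBfs adw 0 q d = d := rfl

lemma pvBfs_nil (adw : PySem.Dict Int (PySem.Set Int)) (f : Nat) (d : PySem.Dict Int Int) :
    pvBfs adw f [] d = d := by cases f <;> rfl

lemma pvBfs_succ_cons (adw : PySem.Dict Int (PySem.Set Int)) (f : Nat) (a : Int) (q : List Int)
    (d : PySem.Dict Int Int) :
    pvBfs adw (f + 1) (a :: q) d
      = pvBfs adw f ((PySem.Dict.getD adw a PySem.Set.empty).foldl (pvStepB a) (d, q)).2
          ((PySem.Dict.getD adw a PySem.Set.empty).foldl (pvStepB a) (d, q)).1 := rfl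

lemma pvGetPreserve {d d1 : PySem.Dict Int Int} {app : List (Int × Int)} {x w : Int}
    (hit : d1.items = d.items ++ app) (hnd : d1.keys.Nodup) (h : d.get? x = some w) :
    d1.get? x = some w := by
  have hm : (x, w) ∈ d.items := PySem.Dict.mem_items_of_get?_eq_some d h
  have hm1 : (x, w) ∈ d1.items := by rw [hit]; exact List.mem_append_left _ hm
  exact PySem.Dict.get?_of_mem_items d1 hm1 hnd

lemma pvInner (actor : Int) (v : Int) (ns : List Int) :
    ∀ (p : PySem.Dict Int (Option Int)) (d : PySem.Dict Int Int) (sA : PySem.Set Int) (qB : List Int),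
    p.keys = d.keys → d.keys.Nodup → d.get? actor = some v → (∀ x ∈ sA, x ∈ p.keys) →
    ∃ new : List Int,
      (ns.foldl (pvStepA actor) (p, sA)).2 = sA ++ new ∧
      (ns.foldl (pvStepB actor) (d, qB)).2 = qB ++ new ∧
      (ns.foldl (pvStepA actor) (p, sA)).1.keys = (ns.foldl (pvStepB actor) (d, qB)).1.keys ∧
      (ns.foldl (pvStepB actor) (d, qB)).1.keys.Nodup ∧
      (ns.foldl (pvStepB actor) (d, qB)).1.items = d.items ++ new.map (fun x => (x, v + 1)) ∧
      new ⊆ ns := by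
  induction ns with
  | nil =>
    intro p d sA qB hk hnd ha hsA
    exact ⟨[], by simp, by simp, hk, hnd, by simp, by simp⟩
  | cons nb t ih =>
    intro p d sA qB hk hnd ha hsA
    have hamem : actor ∈ d.keys := by
      by_contra hnot
      rw [(PySem.Dict.get?_eq_none_iff_not_mem_keys d actor).2 hnot] at ha
      cases ha
    by_cases hc : nb ∈ p.keys
    · have hcp : p.contains nb = true := by
        rw [PySem.Dict.contains_eq_decide_mem_keys]; simpa
      have hcd : d.contains nb = true := by
        rw [PySem.Dict.contains_eq_decide_mem_keys, ← hk]; simpa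
      have e1 : pvStepA actor (p, sA) nb = (p, sA) := by simp [pvStepA, hcp]
      have e2 : pvStepB actor (d, qB) nb = (d, qB) := by simp [pvStepB, hcd]
      simp only [List.foldl_cons, e1, e2]
      obtain ⟨new, h1, h2, h3, h4, h5, h6⟩ := ih p d sA qB hk hnd ha hsA
      exact ⟨new, h1, h2, h3, h4, h5, fun x hx => List.mem_cons_of_mem _ (h6 hx)⟩
    · have hnbd : nb ∉ d.keys := by rw [← hk]; exact hc
      have hcp : p.contains nb = false := by
        rw [PySem.Dict.contains_eq_decide_mem_keys]; simpa
      have hcd : d.contains nb = false := by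
        rw [PySem.Dict.contains_eq_decide_mem_keys]; simpa
      have hne : actor ≠ nb := fun h => hnbd (h ▸ hamem)
      have hval : PySem.Dict.getD d actor 0 = v := PySem.Dict.getD_of_get?_eq_some d 0 ha
      have hadd : PySem.Set.add sA nb = sA ++ [nb] :=
        PySem.Set.add_of_not_mem (fun hmem => hc (hsA _ hmem))
      have e1 : pvStepA actor (p, sA) nb = (p.insert nb (some actor), sA ++ [nb]) := by
        simp [pvStepA, hcp, hadd]
      have e2 : pvStepB actor (d, qB) nb = (d.insert nb (v + 1), qB ++ [nb]) := by
        simp [pvStepB, hcd, hval]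
      have hkeysp : (p.insert nb (some actor)).keys = p.keys ++ [nb] :=
        PySem.Dict.keys_insert_of_not_contains p _ hcp
      have hkeysd : (d.insert nb (v + 1)).keys = d.keys ++ [nb] :=
        PySem.Dict.keys_insert_of_not_contains d _ hcd
      have hitemsd : (d.insert nb (v + 1)).items = d.items ++ [(nb, v + 1)] :=
        PySem.Dict.items_insert_of_not_contains d _ hcd
      obtain ⟨new, h1, h2, h3, h4, h5, h6⟩ := ih (p.insert nb (some actor)) (d.insert nb (v + 1))
        (sA ++ [nb]) (qB ++ [nb])
        (by rw [hkeysp, hkeysd, hk])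
        (by rw [hkeysd]; simp only [List.nodup_append, List.nodup_cons, List.not_mem_nil, not_false_iff, List.nodup_nil, and_true, true_and]; exact ⟨hnd, fun a haa => by simp; exact fun heq => hnbd (heq ▸ haa)⟩)
        (by rw [PySem.Dict.get?_insert_of_ne d _ hne]; exact ha)
        (by
          intro x hx
          rw [hkeysp]
          rcases List.mem_append.1 hx with hx | hx
          · exact List.mem_append_left _ (hsA _ hx)
          · exact List.mem_append_right _ hx)
      refine ⟨nb :: new, ?_, ?_, ?_, ?_, ?_, ?_⟩
      · simp only [List.foldl_cons, e1, h1, List.append_assoc]; rfl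
      · simp only [List.foldl_cons, e2, h2, List.append_assoc]; rfl
      · simp only [List.foldl_cons, e1, e2]; exact h3
      · simp only [List.foldl_cons, e2]; exact h4
      · simp only [List.foldl_cons, e2, h5, hitemsd, List.map_cons, List.append_assoc]; rfl
      · intro x hx
        rcases List.mem_cons.1 hx with rfl | hx
        · exact List.mem_cons_self
        · exact List.mem_cons_of_mem _ (h6 hx)

lemma pvOuter (adw : PySem.Dict Int (PySem.Set Int)) (E : List Int)
    (hE : ∀ a, ∀ x ∈ PySem.Dict.getD adw a PySem.Set.empty, x ∈ E) (v : Int) (L : List Int) :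
    ∀ (p : PySem.Dict Int (Option Int)) (d : PySem.Dict Int Int) (sA : PySem.Set Int)
      (rest : List Int) (f : Nat),
    p.keys = d.keys → d.keys.Nodup → (∀ a ∈ L, d.get? a = some v) → (∀ x ∈ sA, x ∈ p.keys) →
    ∃ (new : List Int) (d' : PySem.Dict Int Int),
      (L.foldl (fun st actor => (PySem.Dict.getD adw actor PySem.Set.empty).foldl (pvStepA actor) st) (p, sA)).2 = sA ++ new ∧
      (L.foldl (fun st actor => (PySem.Dict.getD adw actor PySem.Set.empty).foldl (pvStepA actor) st) (p, sA)).1.keys = d'.keys ∧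
      d'.keys.Nodup ∧
      d'.items = d.items ++ new.map (fun x => (x, v + 1)) ∧
      new ⊆ E ∧
      pvBfs adw (f + L.length) (L ++ rest) d = pvBfs adw f (rest ++ new) d' := by
  induction L with
  | nil =>
    intro p d sA rest f hk hnd hvals hsA
    exact ⟨[], d, by simp, hk, hnd, by simp, by simp, by simp⟩
  | cons a L ih =>
    intro p d sA rest f hk hnd hvals hsA
    obtain ⟨new1, h1, h2, h3, h4, h5, h6⟩ :=
      pvInner a v (PySem.Dict.getD adw a PySem.Set.empty) p d sA (L ++ rest)
        hk hnd (hvals a List.mem_cons_self) hsA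
    have hstA : (PySem.Dict.getD adw a PySem.Set.empty).foldl (pvStepA a) (p, sA)
        = (((PySem.Dict.getD adw a PySem.Set.empty).foldl (pvStepA a) (p, sA)).1, sA ++ new1) := by
      rw [← h1]
    have hkeys1 : ((PySem.Dict.getD adw a PySem.Set.empty).foldl (pvStepB a) (d, L ++ rest)).1.keys
        = d.keys ++ new1 := by
      simp only [PySem.Dict.keys, h5, List.map_append]
      congr 1
      simp [Function.comp_def]
    obtain ⟨new2, d2, g1, g2, g3, g4, g5, g6⟩ :=
      ih ((PySem.Dict.getD adw a PySem.Set.empty).foldl (pvStepA a) (p, sA)).1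
        ((PySem.Dict.getD adw a PySem.Set.empty).foldl (pvStepB a) (d, L ++ rest)).1
        (sA ++ new1) (rest ++ new1) f h3 h4
        (fun a' ha' => pvGetPreserve h5 h4 (hvals a' (List.mem_cons_of_mem _ ha')))
        (by
          intro x hx
          rw [h3, hkeys1]
          rcases List.mem_append.1 hx with hx | hx
          · exact List.mem_append_left _ (hk ▸ hsA _ hx)
          · exact List.mem_append_right _ hx)
    refine ⟨new1 ++ new2, d2, ?_, ?_, g3, ?_, ?_, ?_⟩
    · simp only [List.foldl_cons]
      rw [hstA, g1, List.append_assoc]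
    · simp only [List.foldl_cons]
      rw [hstA, g2]
    · rw [g4, h5, List.map_append, List.append_assoc]
    · intro x hx
      rcases List.mem_append.1 hx with hx | hx
      · exact hE a x (h6 hx)
      · exact g5 hx
    · have e : f + (a :: L).length = (f + L.length) + 1 := by
        simp [List.length_cons]; omega
      rw [e, show (a :: L) ++ rest = a :: (L ++ rest) from rfl, pvBfs_succ_cons, h2,
        List.append_assoc]
      rw [g6, List.append_assoc]

lemma pvPhase2 (adw : PySem.Dict Int (PySem.Set Int)) (n : Int) :
    ∀ (f : Nat) (queue : List Int) (d : PySem.Dict Int Int),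
    d.keys.Nodup → (∀ a ∈ queue, ∃ v, d.get? a = some v ∧ n ≤ v) →
    (pvBfs adw f queue d).items.filter (fun q => q.2 == n) = d.items.filter (fun q => q.2 == n) := by
  intro f
  induction f with
  | zero => intro queue d hnd hq; rw [pvBfs_zero]
  | succ f ih =>
    intro queue d hnd hq
    cases queue with
    | nil => rw [pvBfs_nil]
    | cons a rest =>
      obtain ⟨v, hv, hnv⟩ := hq a List.mem_cons_self
      obtain ⟨new, h1, h2, h3, h4, h5, h6⟩ :=
        pvInner a v (PySem.Dict.getD adw a PySem.Set.empty)
          (PySem.Dict.mk (d.items.map (fun q => (q.1, (none : Option Int))))) d [] rest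
          (by simp [PySem.Dict.keys, List.map_map]) hnd hv (by simp)
      have hq' : ∀ a' ∈ ((PySem.Dict.getD adw a PySem.Set.empty).foldl (pvStepB a) (d, rest)).2,
          ∃ v', ((PySem.Dict.getD adw a PySem.Set.empty).foldl (pvStepB a) (d, rest)).1.get? a' = some v' ∧ n ≤ v' := by
        intro a' ha'
        rw [h2] at ha'
        rcases List.mem_append.1 ha' with ha' | ha'
        · obtain ⟨v', hv', hnv'⟩ := hq a' (List.mem_cons_of_mem _ ha')
          exact ⟨v', pvGetPreserve h5 h4 hv', hnv'⟩
        · refine ⟨v + 1, ?_, by omega⟩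
          refine PySem.Dict.get?_of_mem_items _ ?_ h4
          rw [h5]
          exact List.mem_append_right _ (List.mem_map.2 ⟨a', ha', rfl⟩)
      have hP : ∀ q ∈ List.map (fun x => (x, v + 1)) new, ¬((fun q => q.2 == n) q = true) := by
        intro q hq'
        obtain ⟨x, hx, rfl⟩ := List.mem_map.1 hq'
        simp only [beq_iff_eq]
        omega
      rw [pvBfs_succ_cons, ih _ _ h4 hq', h5, List.filter_append,
        List.filter_eq_nil_iff.2 hP, List.append_nil]

lemma pvMain (adw : PySem.Dict Int (PySem.Set Int)) (E : List Int)
    (hE : ∀ a, ∀ x ∈ PySem.Dict.getD adw a PySem.Set.empty, x ∈ E) (n : Int) :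
    ∀ (m : Nat) (k : Int) (p : PySem.Dict Int (Option Int)) (d : PySem.Dict Int Int)
      (cur : PySem.Set Int) (f : Nat),
    p.keys = d.keys → d.keys.Nodup → (∀ x ∈ d.keys, x ∈ E) →
    (∀ a ∈ cur, d.get? a = some k) → (∀ x ∈ cur, x ∈ p.keys) →
    (∀ q ∈ d.items, q.2 ≤ k) →
    d.items.filter (fun q => q.2 == n) = (if m = 0 then cur.map (fun a => (a, n)) else []) →
    k + m = n →
    E.length + 1 + cur.length ≤ f + d.keys.length →
    pvLoopA adw m p cur = ((pvBfs adw f cur d).items.filter (fun q => q.2 == n)).map Prod.fst := by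
  intro m
  induction m with
  | zero =>
    intro k p d cur f hk hnd hkE hval hcur hle hfil hkm hfuel
    have hkn : k = n := by push_cast at hkm; omega
    rw [show pvLoopA adw 0 p cur = cur from rfl,
      pvPhase2 adw n f cur d hnd (fun a ha => ⟨k, hval a ha, by omega⟩), hfil, if_pos rfl,
      List.map_map]
    simp [Function.comp_def]
  | succ m ih =>
    intro k p d cur f hk hnd hkE hval hcur hle hfil hkm hfuel
    have hklen : d.keys.length ≤ E.length :=
      List.Subperm.length_le (List.Nodup.subperm hnd (fun x hx => hkE x hx))
    have hf : cur.length ≤ f := by omega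
    obtain ⟨new, d', h1, h2, h3, h4, h5, h6⟩ :=
      pvOuter adw E hE k cur p d PySem.Set.empty [] (f - cur.length) hk hnd hval (by simp [PySem.Set.empty])
    simp only [List.nil_append] at h6
    have hBeq : pvBfs adw f cur d = pvBfs adw (f - cur.length) new d' := by
      rw [← h6, Nat.sub_add_cancel hf, List.append_nil]
    have hnew : (pvExpand adw cur p).2 = new := by
      rw [pvExpand_eq]
      rw [h1]
      simp [PySem.Set.empty]
    have hkeys' : d'.keys = d.keys ++ new := by
      simp only [PySem.Dict.keys, h4, List.map_append]
      congr 1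
      simp [Function.comp_def]
    have hfilx : List.filter (fun q => q.2 == n) d.items = [] := by
      rw [hfil, if_neg (Nat.succ_ne_zero m)]
    by_cases hempty : new = []
    · have hA : pvLoopA adw (m + 1) p cur = PySem.Set.empty := by
        show (let r := pvExpand adw cur p;
          if r.2 = PySem.Set.empty then PySem.Set.empty else pvLoopA adw m r.1 r.2) = PySem.Set.empty
        simp only [hnew, hempty]
        simp [PySem.Set.empty]
      rw [hA, hBeq, hempty, pvBfs_nil, h4, hempty, List.filter_append, hfilx]
      simp [PySem.Set.empty]
    · have hA : pvLoopA adw (m + 1) p cur = pvLoopA adw m (pvExpand adw cur p).1 new := by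
        show (let r := pvExpand adw cur p;
          if r.2 = PySem.Set.empty then PySem.Set.empty else pvLoopA adw m r.1 r.2) = _
        simp only [hnew]
        rw [if_neg (by simpa [PySem.Set.empty] using hempty)]
      rw [hA, hBeq]
      refine ih (k + 1) (pvExpand adw cur p).1 d' new (f - cur.length) ?_ h3 ?_ ?_ ?_ ?_ ?_ ?_ ?_
      · rw [pvExpand_eq]; exact h2
      · intro x hx
        rw [hkeys'] at hx
        rcases List.mem_append.1 hx with hx | hx
        · exact hkE x hx
        · exact h5 hx
      · intro a ha
        refine PySem.Dict.get?_of_mem_items d' ?_ h3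
        rw [h4]
        exact List.mem_append_right _ (List.mem_map.2 ⟨a, ha, rfl⟩)
      · intro x hx
        rw [pvExpand_eq, h2, hkeys']
        exact List.mem_append_right _ hx
      · intro q hq
        rw [h4] at hq
        rcases List.mem_append.1 hq with hq | hq
        · have := hle q hq; omega
        · obtain ⟨x, hx, rfl⟩ := List.mem_map.1 hq
          simp
      · rw [h4, List.filter_append, hfilx, List.nil_append]
        by_cases hm : m = 0
        · rw [if_pos hm]
          have hkn : k + 1 = n := by subst hm; push_cast at hkm; omega
          rw [← hkn]
          refine List.filter_eq_self.2 ?_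
          intro q hq
          obtain ⟨x, hx, rfl⟩ := List.mem_map.1 hq
          simp
        · rw [if_neg hm]
          refine List.filter_eq_nil_iff.2 ?_
          intro q hq
          obtain ⟨x, hx, rfl⟩ := List.mem_map.1 hq
          simp only [beq_iff_eq]
          have : (1:Int) ≤ m := by exact_mod_cast Nat.one_le_iff_ne_zero.2 hm
          push_cast at hkm
          omega
      · push_cast at hkm ⊢; omega
      · rw [hkeys', List.length_append]
        omega

lemma pvAdwRangeAux (E : List Int) :
    ∀ (l : List (Int × Int × Int)) (d0 : PySem.Dict Int (PySem.Set Int)),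
    (∀ t ∈ l, t.1 ∈ E ∧ t.2.1 ∈ E) →
    (∀ a, ∀ x ∈ PySem.Dict.getD d0 a PySem.Set.empty, x ∈ E) →
    ∀ a, ∀ x ∈ PySem.Dict.getD
      (l.foldl (fun acted_with t =>
        let d1 := PySem.Dict.modify acted_with t.1 PySem.Set.empty (fun s => PySem.Set.add s t.2.1)
        PySem.Dict.modify d1 t.2.1 PySem.Set.empty (fun s => PySem.Set.add s t.1)) d0)
      a PySem.Set.empty, x ∈ E := by
  intro l
  induction l with
  | nil => intro d0 _ h0; exact h0
  | cons t l ih =>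
    intro d0 hl h0
    refine ih _ (fun t' ht' => hl t' (List.mem_cons_of_mem _ ht')) ?_
    intro a x hx
    obtain ⟨h1, h2⟩ := hl t List.mem_cons_self
    simp only [PySem.Dict.getD_modify] at hx
    split_ifs at hx with hj hi hi
    · rcases (PySem.Set.mem_add _ _ _).1 hx with hx | rfl
      · rcases (PySem.Set.mem_add _ _ _).1 hx with hx | rfl
        · exact h0 _ _ hx
        · exact h2
      · exact h1
    · rcases (PySem.Set.mem_add _ _ _).1 hx with hx | rfl
      · exact h0 _ _ hx
      · exact h1
    · rcases (PySem.Set.mem_add _ _ _).1 hx with hx | rfl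
      · exact h0 _ _ hx
      · exact h2
    · exact h0 _ _ hx

def pvEnds (data : List (Int × Int × Int)) : List Int :=
  pvBACON :: data.flatMap (fun t => [t.1, t.2.1])

lemma pvAdwRange (data : List (Int × Int × Int)) :
    ∀ a, ∀ x ∈ PySem.Dict.getD (pvMakeNeighborDb data) a PySem.Set.empty, x ∈ pvEnds data := by
  refine pvAdwRangeAux (pvEnds data) data PySem.Dict.empty ?_ ?_
  · intro t ht
    constructor
    · exact List.mem_cons_of_mem _ (List.mem_flatMap.2 ⟨t, ht, by simp⟩)
    · exact List.mem_cons_of_mem _ (List.mem_flatMap.2 ⟨t, ht, by simp⟩)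
  · intro a x hx
    simp [PySem.Dict.getD_empty, PySem.Set.empty] at hx

-- ===== VERDICT (by name: the statement is the Claim_ definition above) =====
theorem get_actors_with_bacon_number_spec : Claim_equal_get_actors_with_bacon_number := by
  intro data n _ _
  unfold Spec_get_actors_with_bacon_number get_actors_with_bacon_number get_actors_with_bacon_number_alt
  by_cases hn : n ≤ 0
  · rw [if_pos hn, show n.toNat = 0 from by omega]
    show PySem.Set.add PySem.Set.empty pvBACON = [pvBACON]
    decide
  · rw [if_neg hn]
    have hn1 : 1 ≤ n := by omega
    have hcur : PySem.Set.add PySem.Set.empty pvBACON = [pvBACON] := by decide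
    have hk0 : (PySem.Dict.insert PySem.Dict.empty pvBACON (0 : Int)).keys = [pvBACON] := by decide
    have hkp0 : (PySem.Dict.insert PySem.Dict.empty pvBACON (none : Option Int)).keys = [pvBACON] := by
      decide
    have hi0 : (PySem.Dict.insert PySem.Dict.empty pvBACON (0 : Int)).items = [(pvBACON, 0)] := by
      decide
    have hlen : (pvEnds data).length = 1 + 2 * data.length := by
      induction data with
      | nil => rfl
      | cons t l ihl => simp [pvEnds] at ihl ⊢; omega
    have hmain := pvMain (pvMakeNeighborDb data) (pvEnds data) (pvAdwRange data) n n.toNat 0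
      (PySem.Dict.insert PySem.Dict.empty pvBACON none)
      (PySem.Dict.insert PySem.Dict.empty pvBACON 0)
      [pvBACON] (2 * data.length + 2)
      (by rw [hkp0, hk0])
      (by rw [hk0]; simp)
      (by rw [hk0]; intro x hx; simp at hx; subst hx; simp [pvEnds])
      (by intro a ha; simp at ha; subst ha; decide)
      (by intro x hx; simp at hx; subst hx; rw [hkp0]; simp)
      (by intro q hq; rw [hi0] at hq; simp at hq; subst hq; simp)
      (by
        rw [hi0, if_neg (show ¬ n.toNat = 0 by omega)]
        have hb : ((pvBACON, (0 : Int)).2 == n) = false := by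
          simp only [beq_eq_false_iff_ne]
          simp only [ne_eq]
          omega
        simp [hb])
      (by omega)
      (by rw [hlen, hk0]; simp; omega)
    show pvLoopA (pvMakeNeighborDb data) n.toNat _ (PySem.Set.add PySem.Set.empty pvBACON)
      = ((pvBfs (pvActedWith data) (2 * data.length + 2) [pvBACON]
          (PySem.Dict.insert PySem.Dict.empty pvBACON 0)).items.filter
          (fun q => q.2 == n)).map Prod.fst
    rw [hcur, show pvActedWith data = pvMakeNeighborDb data from rfl]
    exact hmain
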